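-- pv_equiv track=rewrite | github.com/mjirik/io3d | io3d/dili.py | list_filter
-- ===== SOURCE A (Python) =====
-- def list_filter(lst, startswith=None, notstartswith=None,
--                 contain=None, notcontain=None):
--     """ Keep in list items according to filter parameters.
--
--     :param lst: item list
--     :param startswith: keep items starting with
--     :param notstartswith: remove items starting with
--     :return:
--     """
--     keeped = []
--     for item in lst:
--         keep = False
--         if startswith is not None:
--             if item.startswith(startswith):
--                 keep = True
--         if notstartswith is not None:
--             if not item.startswith(notstartswith):
--                 keep = True
--         if contain is not None:
--             if contain in item:
--                 keep = True
--         if notcontain is not None: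
--             if not notcontain in item:
--                 keep = True
--
--         if keep:
--             keeped.append(item)
--     return keeped
-- ===== SOURCE B (Python) =====
-- def list_filter(lst, startswith=None, notstartswith=None,
--                 contain=None, notcontain=None):
--     """Staged passes: collect the set of values matched by each active criterion,
--     then select the items whose value is in that set (keep depends only on value)."""
--     hits = set()
--     if startswith is not None:
--         hits.update(item for item in lst if item.startswith(startswith))
--     if notstartswith is not None:
--         hits.update(item for item in lst if not item.startswith(notstartswith))
--     if contain is not None:
--         hits.update(item for item in lst if contain in item)
--     if notcontain is not None:
--         hits.update(item for item in lst if notcontain not in item)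
--     return [item for item in lst if item in hits]
-- ===== Notes on version B (the rewrite author's own statement) =====
-- stated objective: alternative
-- what changed: Replaces A's single pass with a per-item mutable keep flag by staged passes: each active criterion independently scans the list and adds its matching values to a hit set, and a final pass keeps items whose value is in the set; correct because the keep decision depends only on the item's value.
import Mathlib
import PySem

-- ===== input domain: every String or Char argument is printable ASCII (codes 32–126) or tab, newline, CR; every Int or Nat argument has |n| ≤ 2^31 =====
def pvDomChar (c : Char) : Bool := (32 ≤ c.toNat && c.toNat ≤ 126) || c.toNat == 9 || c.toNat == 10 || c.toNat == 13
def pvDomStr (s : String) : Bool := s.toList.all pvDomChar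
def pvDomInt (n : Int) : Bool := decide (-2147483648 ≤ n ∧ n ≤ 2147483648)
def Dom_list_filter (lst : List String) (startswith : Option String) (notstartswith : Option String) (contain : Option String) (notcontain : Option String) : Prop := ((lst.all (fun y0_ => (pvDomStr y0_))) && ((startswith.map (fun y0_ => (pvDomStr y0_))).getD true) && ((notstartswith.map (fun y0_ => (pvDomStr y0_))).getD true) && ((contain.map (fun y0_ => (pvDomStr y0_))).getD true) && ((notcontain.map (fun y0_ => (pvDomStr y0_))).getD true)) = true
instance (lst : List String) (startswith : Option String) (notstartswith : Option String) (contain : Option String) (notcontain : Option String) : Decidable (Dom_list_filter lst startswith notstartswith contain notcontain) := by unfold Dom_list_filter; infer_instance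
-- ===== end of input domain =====

-- B replaces A's single pass with a per-item keep flag by staged passes: each active
-- criterion scans the list and adds its matching values to a hit set, and a final pass
-- keeps items whose value is in the set (alternative decomposition; same cost).

-- ===== PORT A =====
-- per-item 'keep' flag computed by the four guards, in A's order
def pvKeepA (startswith notstartswith contain notcontain : Option String) (item : String) : Bool :=
  let keep := false
  let keep := match startswith with
    | some p => if PySem.Str.startswith item p then true else keep
    | none => keep
  let keep := match notstartswith with
    | some p => if !(PySem.Str.startswith item p) then true else keep
    | none => keep
  let keep := match contain with
    | some c => if PySem.Str.isIn c item then true else keep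
    | none => keep
  let keep := match notcontain with
    | some c => if !(PySem.Str.isIn c item) then true else keep
    | none => keep
  keep

def list_filter (lst : List String) (startswith : Option String) (notstartswith : Option String) (contain : Option String) (notcontain : Option String) : List String :=
  lst.foldl (fun keeped item =>
    if pvKeepA startswith notstartswith contain notcontain item then keeped ++ [item] else keeped) []

-- ===== PORT B =====
-- the hit set: four staged passes, each adding the values matched by one active criterion
def pvHits (lst : List String) (startswith notstartswith contain notcontain : Option String) : PySem.Set String :=
  let hits : PySem.Set String := PySem.Set.empty
  let hits := match startswith with
    | some p => PySem.Set.update hits (lst.filter (fun item => PySem.Str.startswith item p))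
    | none => hits
  let hits := match notstartswith with
    | some p => PySem.Set.update hits (lst.filter (fun item => !(PySem.Str.startswith item p)))
    | none => hits
  let hits := match contain with
    | some c => PySem.Set.update hits (lst.filter (fun item => PySem.Str.isIn c item))
    | none => hits
  let hits := match notcontain with
    | some c => PySem.Set.update hits (lst.filter (fun item => !(PySem.Str.isIn c item)))
    | none => hits
  hits

def list_filter_alt (lst : List String) (startswith : Option String) (notstartswith : Option String) (contain : Option String) (notcontain : Option String) : List String :=
  let hits := pvHits lst startswith notstartswith contain notcontain
  lst.filter (fun item => PySem.Set.contains hits item)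

-- ===== PRECONDITION & SPEC =====
def Spec_list_filter (lst : List String) (startswith : Option String) (notstartswith : Option String) (contain : Option String) (notcontain : Option String) (out : List String) : Prop := out = list_filter_alt lst startswith notstartswith contain notcontain
instance (lst : List String) (startswith : Option String) (notstartswith : Option String) (contain : Option String) (notcontain : Option String) (out : List String) : Decidable (Spec_list_filter lst startswith notstartswith contain notcontain out) := by unfold Spec_list_filter; infer_instance

-- ===== CLAIM (what is proved, stated in full; the proofs are below) =====
def Claim_equal_list_filter : Prop := ∀ (lst : List String) (startswith : Option String) (notstartswith : Option String) (contain : Option String) (notcontain : Option String), Dom_list_filter lst startswith notstartswith contain notcontain → Spec_list_filter lst startswith notstartswith contain notcontain (list_filter lst startswith notstartswith contain notcontain)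

-- ===== LEMMAS AND PROOFS =====
-- for an item of the list, membership in B's hit set is exactly A's keep flag
theorem contains_pvHits (lst : List String) (sw nsw c nc : Option String)
    (x : String) (hx : x ∈ lst) :
    PySem.Set.contains (pvHits lst sw nsw c nc) x = pvKeepA sw nsw c nc x := by
  rw [Bool.eq_iff_iff, PySem.Set.contains_iff]
  rcases sw with _ | p1 <;> rcases nsw with _ | p2 <;> rcases c with _ | c1 <;> rcases nc with _ | c2 <;>
    simp [pvHits, pvKeepA, PySem.Set.mem_update, PySem.Set.empty, List.mem_filter, hx,
      or_comm, or_left_comm, or_assoc]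

-- ===== VERDICT (by name: the statement is the Claim_ definition above) =====
theorem list_filter_spec : Claim_equal_list_filter := by
  intro lst sw nsw c nc _
  unfold Spec_list_filter list_filter list_filter_alt
  rw [PySem.List.foldl_append_if_eq_filter]
  simp only [List.nil_append]
  exact List.filter_congr (fun x hx => (contains_pvHits lst sw nsw c nc x hx).symm)
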